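-- pv_equiv track=rewrite | github.com/VikramFH/DynamicProgramming | sub_type_problems/submatrix_sum.py | submatrix_brute_force
-- ===== SOURCE A (Python) =====
-- def submatrix_brute_force(matrix,queries):
--     result = []
--     for top,left,bottom,right in queries:
--         rectangle_sum=0
--         for row in matrix[top:bottom]:
--             rectangle_sum=rectangle_sum+sum(row[left:right])
--         result.append(rectangle_sum)
--
--     return result
-- ===== SOURCE B (Python) =====
-- def submatrix_brute_force(matrix, queries):
--     # Per-row prefix sums built once; each query then costs O(rows) instead of O(rows*cols).
--     def build(row):
--         p = [0]
--         acc = 0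
--         for x in row:
--             acc += x
--             p.append(acc)
--         return p
--
--     def clamp(i, n):
--         # Python slice-bound normalisation
--         if i < 0:
--             i += n
--         if i < 0:
--             return 0
--         if i > n:
--             return n
--         return i
--
--     prefixes = [build(row) for row in matrix]
--     m = len(matrix)
--     out = []
--     for top, left, bottom, right in queries:
--         t = clamp(top, m)
--         b = clamp(bottom, m)
--         s = 0
--         for r in range(t, b):
--             p = prefixes[r]
--             n = len(p) - 1
--             l = clamp(left, n)
--             rr = clamp(right, n)
--             if l < rr:
--                 s += p[rr] - p[l]
--         out.append(s)
--     return out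
-- ===== Notes on version B (the rewrite author's own statement) =====
-- stated objective: faster
-- what changed: B precomputes a prefix-sum list per row once, then answers each query by summing one prefix difference per row in the clamped row range, removing A's inner column scan over each row slice.
import Mathlib
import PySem

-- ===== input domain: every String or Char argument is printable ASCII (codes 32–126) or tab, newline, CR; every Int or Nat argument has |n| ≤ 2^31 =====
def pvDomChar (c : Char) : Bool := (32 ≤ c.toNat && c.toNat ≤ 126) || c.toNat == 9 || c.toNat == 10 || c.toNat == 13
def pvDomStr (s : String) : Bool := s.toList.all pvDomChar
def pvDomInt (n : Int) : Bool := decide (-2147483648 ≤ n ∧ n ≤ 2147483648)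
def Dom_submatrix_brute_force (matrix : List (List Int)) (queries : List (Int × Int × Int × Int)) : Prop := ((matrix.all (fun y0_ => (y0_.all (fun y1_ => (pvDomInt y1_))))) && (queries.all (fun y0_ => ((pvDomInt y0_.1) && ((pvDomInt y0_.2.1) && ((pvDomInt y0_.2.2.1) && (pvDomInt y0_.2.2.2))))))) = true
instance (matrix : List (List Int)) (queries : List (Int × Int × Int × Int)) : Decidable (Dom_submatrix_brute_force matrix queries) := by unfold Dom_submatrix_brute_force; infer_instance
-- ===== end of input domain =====

-- B precomputes per-row prefix sums once so each query costs O(rows) instead of O(rows*cols) (faster).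

-- ===== PORT A =====
def submatrix_brute_force (matrix : List (List Int)) (queries : List (Int × Int × Int × Int)) : List Int :=
  queries.foldl (fun result q =>
    let rectangle_sum :=
      (PySem.List.slice matrix (some q.1) (some q.2.2.1)).foldl
        (fun rectangle_sum row => rectangle_sum + (PySem.List.slice row (some q.2.1) (some q.2.2.2)).sum) 0
    result ++ [rectangle_sum]) []

-- ===== PORT B =====
-- helper `build` of Source B: running prefix-sum list [0, x0, x0+x1, …]
def pvBuild (row : List Int) : List Int :=
  (row.foldl (fun (st : List Int × Int) x => (st.1 ++ [st.2 + x], st.2 + x)) ([0], 0)).1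

-- helper `clamp` of Source B: Python slice-bound normalisation
def pvClamp (i n : Int) : Int :=
  let i' := if i < 0 then i + n else i
  if i' < 0 then 0 else if i' > n then n else i'

def submatrix_brute_force_alt (matrix : List (List Int)) (queries : List (Int × Int × Int × Int)) : List Int :=
  let prefixes := matrix.map pvBuild
  let m : Int := matrix.length
  queries.foldl (fun out q =>
    let t := pvClamp q.1 m
    let b := pvClamp q.2.2.1 m
    let s := (PySem.List.pyRange t b 1).foldl (fun s r =>
      let p := PySem.List.pyGetD prefixes r []
      let n : Int := (p.length : Int) - 1
      let l := pvClamp q.2.1 n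
      let rr := pvClamp q.2.2.2 n
      if l < rr then s + (PySem.List.pyGetD p rr 0 - PySem.List.pyGetD p l 0) else s) 0
    out ++ [s]) []

-- ===== PRECONDITION & SPEC =====
def Spec_submatrix_brute_force (matrix : List (List Int)) (queries : List (Int × Int × Int × Int)) (out : List Int) : Prop := out = submatrix_brute_force_alt matrix queries
instance (matrix : List (List Int)) (queries : List (Int × Int × Int × Int)) (out : List Int) : Decidable (Spec_submatrix_brute_force matrix queries out) := by unfold Spec_submatrix_brute_force; infer_instance

-- ===== CLAIM (what is proved, stated in full; the proofs are below) =====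
def Claim_equal_submatrix_brute_force : Prop := ∀ (matrix : List (List Int)) (queries : List (Int × Int × Int × Int)), Dom_submatrix_brute_force matrix queries → Spec_submatrix_brute_force matrix queries (submatrix_brute_force matrix queries)

-- ===== LEMMAS AND PROOFS =====

-- Source B's clamp computes exactly PySem's slice-bound clamp
theorem pvClamp_eq_clampIdx (i : Int) (n : Nat) :
    pvClamp i (n : Int) = ((PySem.List.clampIdx n i : Nat) : Int) := by
  simp only [pvClamp, PySem.List.clampIdx]
  split_ifs <;> omega

-- the prefix-sum list Source B builds, characterised
theorem pvBuild_aux (row p : List Int) (a : Int) :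
    (row.foldl (fun (st : List Int × Int) x => (st.1 ++ [st.2 + x], st.2 + x)) (p, a)).1
      = p ++ (List.range row.length).map (fun k => a + (row.take (k+1)).sum) := by
  induction row generalizing p a with
  | nil => simp
  | cons x row ih =>
    simp only [List.foldl_cons, ih, List.length_cons, List.range_succ_eq_map,
      List.map_cons, List.map_map]
    simp [List.append_assoc, Function.comp, add_assoc]

theorem pvBuild_spec (row : List Int) :
    pvBuild row = (List.range (row.length + 1)).map (fun k => (row.take k).sum) := by
  have := pvBuild_aux row [0] 0
  simp only [pvBuild, this, List.range_succ_eq_map, List.map_cons, List.map_map]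
  simp [Function.comp]

theorem pvBuild_length (row : List Int) : (pvBuild row).length = row.length + 1 := by
  simp [pvBuild_spec]

theorem pvBuild_getD (row : List Int) (k : Nat) (hk : k ≤ row.length) :
    (pvBuild row).getD k 0 = (row.take k).sum := by
  rw [pvBuild_spec, PySem.List.getD_map_range _ _ _ _ (by omega)]

-- sum of a slice, via clamped bounds
theorem slice_sum (row : List Int) (l r : Int) :
    (PySem.List.slice row (some l) (some r)).sum
      = if ((PySem.List.clampIdx row.length l : Nat) : Int) < ((PySem.List.clampIdx row.length r : Nat) : Int)
        then (row.take (PySem.List.clampIdx row.length r)).sum - (row.take (PySem.List.clampIdx row.length l)).sum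
        else 0 := by
  simp only [PySem.List.slice]
  set a := PySem.List.clampIdx row.length l with ha
  set b := PySem.List.clampIdx row.length r with hb
  by_cases h : a < b
  · rw [if_pos (by exact_mod_cast h)]
    have key : (row.take b).sum = (row.take a).sum + ((row.drop a).take (b - a)).sum := by
      conv_lhs => rw [show b = a + (b - a) by omega]
      rw [List.take_add, List.sum_append]
    omega
  · rw [if_neg (by exact_mod_cast h)]
    have hz : b - a = 0 := by omega
    simp [hz]

-- the value B computes for one row equals the slice sum A computes there
theorem row_val (row : List Int) (left right : Int) :
    (let p := pvBuild row
     let n : Int := (p.length : Int) - 1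
     if pvClamp left n < pvClamp right n
     then PySem.List.pyGetD p (pvClamp right n) 0 - PySem.List.pyGetD p (pvClamp left n) 0
     else 0)
    = (PySem.List.slice row (some left) (some right)).sum := by
  have hn : ((pvBuild row).length : Int) - 1 = (row.length : Int) := by
    simp [pvBuild_length]
  simp only [hn, pvClamp_eq_clampIdx left, pvClamp_eq_clampIdx right, slice_sum]
  set a := PySem.List.clampIdx row.length left with ha
  set b := PySem.List.clampIdx row.length right with hb
  by_cases h : ((a : Nat) : Int) < ((b : Nat) : Int)
  · rw [if_pos h, if_pos h]
    have hget : ∀ k : Nat, k ≤ row.length → PySem.List.pyGetD (pvBuild row) ((k : Nat) : Int) 0 = (row.take k).sum := by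
      intro k hk
      rw [PySem.List.pyGetD_of_nonneg _ _ (by positivity)]
      simpa using pvBuild_getD row k hk
    rw [hget a (PySem.List.clampIdx_le _ _), hget b (PySem.List.clampIdx_le _ _)]
  · rw [if_neg h, if_neg h]

-- one query, A's side = B's side
theorem query_eq (matrix : List (List Int)) (top left bottom right : Int) :
    (PySem.List.slice matrix (some top) (some bottom)).foldl
        (fun acc row => acc + (PySem.List.slice row (some left) (some right)).sum) 0
      = (PySem.List.pyRange (pvClamp top (matrix.length : Int)) (pvClamp bottom (matrix.length : Int)) 1).foldl
          (fun s r =>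
            let p := PySem.List.pyGetD (matrix.map pvBuild) r []
            let n : Int := (p.length : Int) - 1
            let l := pvClamp left n
            let rr := pvClamp right n
            if l < rr then s + (PySem.List.pyGetD p rr 0 - PySem.List.pyGetD p l 0) else s) 0 := by
  rw [pvClamp_eq_clampIdx top, pvClamp_eq_clampIdx bottom]
  set t := PySem.List.clampIdx matrix.length top with ht
  set b := PySem.List.clampIdx matrix.length bottom with hb
  -- B's loop body as an addition
  have hfun : (fun (s : Int) (r : Int) =>
        let p := PySem.List.pyGetD (matrix.map pvBuild) r []
        let n : Int := (p.length : Int) - 1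
        let l := pvClamp left n
        let rr := pvClamp right n
        if l < rr then s + (PySem.List.pyGetD p rr 0 - PySem.List.pyGetD p l 0) else s)
      = (fun (s : Int) (r : Int) => s +
          (let p := PySem.List.pyGetD (matrix.map pvBuild) r []
           let n : Int := (p.length : Int) - 1
           if pvClamp left n < pvClamp right n
           then PySem.List.pyGetD p (pvClamp right n) 0 - PySem.List.pyGetD p (pvClamp left n) 0
           else 0)) := by
    funext s r
    simp only
    split_ifs <;> simp
  rw [hfun, PySem.List.foldl_add, PySem.List.foldl_add]
  congr 1
  -- the two mapped lists coincide
  rw [PySem.List.pyRange_one]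
  rw [List.map_map]
  have hslice : PySem.List.slice matrix (some top) (some bottom) = (matrix.drop t).take (b - t) := by
    simp only [PySem.List.slice, ← ht, ← hb]
  rw [hslice]
  have htn : t ≤ matrix.length := PySem.List.clampIdx_le _ _
  have hbn : b ≤ matrix.length := PySem.List.clampIdx_le _ _
  have hcnt : ((b : Int) - (t : Int)).toNat = b - t := by omega
  rw [hcnt]
  apply congrArg List.sum
  apply List.ext_getElem
  · simp; omega
  · intro k h1 h2
    have hk : k < b - t := by simpa using h2
    have hidx : t + k < matrix.length := by omega
    rw [List.getElem_map, List.getElem_map]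
    rw [List.getElem_take, List.getElem_drop]
    simp only [Function.comp_apply, List.getElem_range]
    have hp : PySem.List.pyGetD (matrix.map pvBuild) ((t : Int) + (k : Int)) []
        = pvBuild (matrix[t + k]) := by
      rw [PySem.List.pyGetD_of_nonneg _ _ (by positivity)]
      have h3 : ((t : Int) + (k : Int)).toNat = t + k := by omega
      rw [h3, List.getD_eq_getElem _ _ (by simpa using hidx), List.getElem_map]
    simp only [hp]
    exact (row_val (matrix[t + k]) left right).symm

-- ===== VERDICT (by name: the statement is the Claim_ definition above) =====
theorem submatrix_brute_force_spec : Claim_equal_submatrix_brute_force := by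
  intro matrix queries _
  unfold Spec_submatrix_brute_force submatrix_brute_force submatrix_brute_force_alt
  simp only [PySem.List.foldl_append_singleton_eq_map, List.nil_append]
  apply List.map_congr_left
  intro q _
  exact query_eq matrix q.1 q.2.1 q.2.2.1 q.2.2.2
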